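-- pv_equiv track=rewrite | github.com/JacobFunnel/advent_of_code | 2023/121.py | compare_and_reduce_group_sizes
-- ===== SOURCE A (Python) =====
-- def compare_and_reduce_group_sizes(seqs, seq_ls, groups):
--     if len(seq_ls) == len(groups):
--         return seqs, seq_ls, groups
--     else:
--         while seq_ls[0] == groups[0]:
--             seqs.pop(0)
--             seq_ls.pop(0)
--             groups.pop(0)
--         while seq_ls[-1] == groups[-1]:
--             seqs.pop(-1)
--             seq_ls.pop(-1)
--             groups.pop(-1)
--         return seqs, seq_ls, groups
-- ===== SOURCE B (Python) =====
-- def compare_and_reduce_group_sizes(seqs, seq_ls, groups):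
--     # Return-value equivalent to A (A mutates its arguments in place; B does not).
--     if len(seq_ls) == len(groups):
--         return seqs, seq_ls, groups
--     m = min(len(seq_ls), len(groups))
--     p = 0
--     while p < m and seq_ls[p] == groups[p]:
--         p += 1
--     a = seq_ls[p:]
--     b = groups[p:]
--     q = 0
--     while q < min(len(a), len(b)) and a[-1 - q] == b[-1 - q]:
--         q += 1
--     return (seqs[p:len(seqs) - q],
--             seq_ls[p:len(seq_ls) - q],
--             groups[p:len(groups) - q])
-- ===== Notes on version B (the rewrite author's own statement) =====
-- stated objective: alternative
-- what changed: B replaces A's repeated pop(0)/pop(-1) mutation loops by counting the matching prefix and suffix lengths once and returning three single slices; B does not mutate its arguments (return-value equivalence).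
import Mathlib
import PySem

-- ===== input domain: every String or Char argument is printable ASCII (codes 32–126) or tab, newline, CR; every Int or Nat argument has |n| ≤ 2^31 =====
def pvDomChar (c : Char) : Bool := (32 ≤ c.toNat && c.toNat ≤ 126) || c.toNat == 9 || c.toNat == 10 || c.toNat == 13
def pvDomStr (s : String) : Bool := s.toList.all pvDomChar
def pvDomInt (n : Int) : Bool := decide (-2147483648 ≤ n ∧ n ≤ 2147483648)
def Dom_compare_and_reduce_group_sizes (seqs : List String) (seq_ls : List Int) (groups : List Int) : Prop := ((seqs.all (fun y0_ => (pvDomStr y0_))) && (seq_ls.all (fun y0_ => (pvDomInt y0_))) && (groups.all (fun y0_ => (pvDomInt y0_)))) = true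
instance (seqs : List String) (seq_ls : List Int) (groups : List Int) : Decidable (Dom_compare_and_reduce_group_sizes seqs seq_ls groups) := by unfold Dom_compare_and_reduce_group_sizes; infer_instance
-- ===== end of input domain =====

-- B trims by counting the matching prefix/suffix once and slicing (A pops element by
-- element and mutates its arguments in place; the equivalence proved is about the
-- RETURN value only).

-- ===== PORT A =====
-- `while seq_ls[0] == groups[0]: seqs.pop(0); seq_ls.pop(0); groups.pop(0)`.
-- Python raises IndexError when seq_ls or groups is empty at the `[0]` check, or when
-- seqs is empty at `seqs.pop(0)`; those inputs are excluded by Pre_ below (here the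
-- match falls through / `tail []` is junk).
def aFront : List String → List Int → List Int → List String × List Int × List Int
  | seqs, a :: l, b :: g =>
      if a = b then aFront seqs.tail l g else (seqs, a :: l, b :: g)
  | seqs, l, g => (seqs, l, g)

def compare_and_reduce_group_sizes (seqs : List String) (seq_ls : List Int) (groups : List Int) : List String × List Int × List Int :=
  if seq_ls.length = groups.length then (seqs, seq_ls, groups)
  else
    match aFront seqs seq_ls groups with
    | (s1, l1, g1) =>
      -- second loop: `while seq_ls[-1] == groups[-1]: … pop(-1)` — the same pop loop
      -- run on the reversed lists (pop(-1) of xs = pop(0) of xs.reverse), reversed back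
      match aFront s1.reverse l1.reverse g1.reverse with
      | (s2, l2, g2) => (s2.reverse, l2.reverse, g2.reverse)

-- ===== PORT B =====
-- `p = 0; while p < m and seq_ls[p] == groups[p]: p += 1` — matching-prefix count
def bP : List Int → List Int → Nat
  | a :: l, b :: g => if a = b then bP l g + 1 else 0
  | _, _ => 0

-- `q = 0; while q < min(len(a), len(b)) and a[-1-q] == b[-1-q]: q += 1` —
-- bounded matching count from the back, i.e. a bounded prefix count of the reversals
def bS : Nat → List Int → List Int → Nat
  | n + 1, a :: l, b :: g => if a = b then bS n l g + 1 else 0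
  | _, _, _ => 0

-- slices xs[p:len(xs)-q] with 0 ≤ p and 0 ≤ len(xs)-q are (xs.drop p).take ((len-q)-p)
-- (PySem.List.slice_natCast), written directly; a = seq_ls[p:] is seq_ls.drop p.
def compare_and_reduce_group_sizes_alt (seqs : List String) (seq_ls : List Int) (groups : List Int) : List String × List Int × List Int :=
  if seq_ls.length = groups.length then (seqs, seq_ls, groups)
  else
    let p := bP seq_ls groups
    let a := seq_ls.drop p
    let b := groups.drop p
    let q := bS (min a.length b.length) a.reverse b.reverse
    ((seqs.drop p).take (seqs.length - q - p),
     (seq_ls.drop p).take (seq_ls.length - q - p),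
     (groups.drop p).take (groups.length - q - p))

-- ===== PRECONDITION & SPEC =====
-- Pre_ excludes exactly the inputs on which A raises IndexError: lengths differ and a
-- trimming loop runs off the end of one of the three lists (the matching prefix, or
-- the matching prefix plus matching suffix, exhausts the shorter int list or seqs).
-- Closed form: p (resp. q) is the matching prefix (suffix) length, pinned by a take-
-- equality plus a mismatch at the next position.
def Pre_compare_and_reduce_group_sizes (seqs : List String) (seq_ls : List Int) (groups : List Int) : Prop :=
  seq_ls.length = groups.length ∨
  ∃ p < min seq_ls.length groups.length, ∃ q < min seq_ls.length groups.length,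
    p + q < min seq_ls.length groups.length ∧ p + q ≤ seqs.length ∧
    seq_ls.take p = groups.take p ∧ seq_ls[p]? ≠ groups[p]? ∧
    seq_ls.reverse.take q = groups.reverse.take q ∧ seq_ls.reverse[q]? ≠ groups.reverse[q]?
instance (seqs : List String) (seq_ls : List Int) (groups : List Int) : Decidable (Pre_compare_and_reduce_group_sizes seqs seq_ls groups) := by unfold Pre_compare_and_reduce_group_sizes; infer_instance

def pvWitness_compare_and_reduce_group_sizes : List String × List Int × List Int :=
  (["a", "b", "c"], [1, 5, 3], [1, 9, 7, 3])

def Spec_compare_and_reduce_group_sizes (seqs : List String) (seq_ls : List Int) (groups : List Int) (out : List String × List Int × List Int) : Prop := out = compare_and_reduce_group_sizes_alt seqs seq_ls groups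
instance (seqs : List String) (seq_ls : List Int) (groups : List Int) (out : List String × List Int × List Int) : Decidable (Spec_compare_and_reduce_group_sizes seqs seq_ls groups out) := by unfold Spec_compare_and_reduce_group_sizes; infer_instance

-- ===== CLAIM (what is proved, stated in full; the proofs are below) =====
def Claim_equal_compare_and_reduce_group_sizes : Prop := ∀ (seqs : List String) (seq_ls : List Int) (groups : List Int), Dom_compare_and_reduce_group_sizes seqs seq_ls groups → Pre_compare_and_reduce_group_sizes seqs seq_ls groups → Spec_compare_and_reduce_group_sizes seqs seq_ls groups (compare_and_reduce_group_sizes seqs seq_ls groups)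

-- ===== LEMMAS AND PROOFS =====

-- the front pop-loop drops exactly the matching prefix from all three lists
theorem aFront_eq_drop (l g : List Int) (seqs : List String) :
    aFront seqs l g = (seqs.drop (bP l g), l.drop (bP l g), g.drop (bP l g)) := by
  induction l generalizing g seqs with
  | nil => cases g <;> simp [aFront, bP]
  | cons a l ih =>
    cases g with
    | nil => simp [aFront, bP]
    | cons b g =>
      by_cases h : a = b
      · simp only [aFront, bP, if_pos h, ih]
        simp
      · simp [aFront, bP, h]

-- a bounded matching count agrees with the unbounded one when the latter is below the bound
theorem bS_eq_bP (n : Nat) (l g : List Int) (h : bP l g < n) : bS n l g = bP l g := by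
  induction n generalizing l g with
  | zero => omega
  | succ n ih =>
    cases l with
    | nil => cases g <;> simp [bS, bP]
    | cons a l =>
      cases g with
      | nil => simp [bS, bP]
      | cons b g =>
        by_cases hab : a = b
        · simp only [bP, bS, if_pos hab] at *
          rw [ih]; omega
        · simp [bS, bP, hab]

-- reversing, dropping q and reversing back is taking all but the last q elements
theorem reverse_drop_reverse {α : Type} (ys : List α) (q : Nat) :
    (ys.reverse.drop q).reverse = ys.take (ys.length - q) := by
  rw [List.drop_reverse, List.reverse_reverse]

-- a take-equality plus a mismatch at position p pins p as the matching-prefix count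
theorem bP_eq_of_take (l g : List Int) (p : Nat)
    (ht : l.take p = g.take p) (hm : l[p]? ≠ g[p]?) : bP l g = p := by
  induction l generalizing g p with
  | nil =>
    cases g with
    | nil => simp at hm
    | cons b g =>
      cases p with
      | zero => simp [bP]
      | succ p => simp at ht
  | cons a l ih =>
    cases g with
    | nil =>
      cases p with
      | zero => simp [bP]
      | succ p => simp at ht
    | cons b g =>
      cases p with
      | zero =>
        simp only [List.getElem?_cons_zero, ne_eq, Option.some.injEq] at hm
        simp [bP, hm]
      | succ p =>
        simp only [List.take_succ_cons, List.cons.injEq] at ht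
        simp only [List.getElem?_cons_succ] at hm
        simp [bP, ht.1, ih g p ht.2 hm]

-- ===== VERDICT (by name: the statement is the Claim_ definition above) =====
theorem compare_and_reduce_group_sizes_spec : Claim_equal_compare_and_reduce_group_sizes := by
  intro seqs l g _ hpre
  unfold Spec_compare_and_reduce_group_sizes
  unfold compare_and_reduce_group_sizes compare_and_reduce_group_sizes_alt
  by_cases hlen : l.length = g.length
  · simp [hlen]
  · simp only [if_neg hlen]
    rcases hpre with h | ⟨p, hpm, q, hqm, hpq, hs, htp, hmp, htq, hmq⟩
    · exact absurd h hlen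
    have hp : bP l g = p := bP_eq_of_take l g p htp hmp
    have hq : bP (l.drop p).reverse (g.drop p).reverse = q := by
      apply bP_eq_of_take
      · rw [List.reverse_drop, List.reverse_drop, List.take_take, List.take_take,
            Nat.min_eq_left (by omega), Nat.min_eq_left (by omega), htq]
      · rw [List.reverse_drop, List.reverse_drop,
            List.getElem?_take_of_lt (by omega), List.getElem?_take_of_lt (by omega)]
        exact hmq
    have hmin : min (l.drop p).length (g.drop p).length = min l.length g.length - p := by
      simp [List.length_drop]; omega
    have hbs : bS (min (l.drop p).length (g.drop p).length) (l.drop p).reverse (g.drop p).reverse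
        = bP (l.drop p).reverse (g.drop p).reverse := by
      rw [hmin]
      exact bS_eq_bP _ _ _ (by omega)
    rw [aFront_eq_drop, aFront_eq_drop]
    simp only [hp, hbs, hq]
    have key : ∀ {α : Type} (xs : List α),
        (((xs.drop p).reverse.drop q).reverse) = (xs.drop p).take (xs.length - q - p) := by
      intro α xs
      rw [reverse_drop_reverse]
      congr 1
      simp [List.length_drop]
      omega
    simp only [key]
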